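-- pv_equiv track=rewrite | github.com/01alan20/admissionswebsite | scripts/clean_majors_meta.py | clean_label
-- ===== SOURCE A (Python) =====
-- def clean_label(value: str) -> str:
--     """
--     Normalise a major label by:
--     - trimming whitespace
--     - stripping leading/trailing quote characters
--     - removing any remaining quote or asterisk characters
--     """
--     if value is None:
--         return value
--
--     s = str(value).strip()
--
--     # Strip balanced leading/trailing quotes repeatedly if present
--     while len(s) >= 2 and s[0] == s[-1] and s[0] in {'"', "'"}:
--         s = s[1:-1].strip()
--
--     # Remove any remaining quote / asterisk characters
--     for ch in ('"', "'", '*'):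
--         s = s.replace(ch, '')
--
--     return s.strip()
-- ===== SOURCE B (Python) =====
-- _DELETE = str.maketrans('', '', '"\'*')
--
-- def clean_label(value: str) -> str:
--     if value is None:
--         return value
--     return str(value).translate(_DELETE).strip()
-- ===== Notes on version B (the rewrite author's own statement) =====
-- stated objective: simpler
-- what changed: Replaces the iterative balanced-quote peeling loop plus three replace passes by a single translation-table deletion of all quote/asterisk characters followed by one strip, which provably yields the identical result.
import Mathlib
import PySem

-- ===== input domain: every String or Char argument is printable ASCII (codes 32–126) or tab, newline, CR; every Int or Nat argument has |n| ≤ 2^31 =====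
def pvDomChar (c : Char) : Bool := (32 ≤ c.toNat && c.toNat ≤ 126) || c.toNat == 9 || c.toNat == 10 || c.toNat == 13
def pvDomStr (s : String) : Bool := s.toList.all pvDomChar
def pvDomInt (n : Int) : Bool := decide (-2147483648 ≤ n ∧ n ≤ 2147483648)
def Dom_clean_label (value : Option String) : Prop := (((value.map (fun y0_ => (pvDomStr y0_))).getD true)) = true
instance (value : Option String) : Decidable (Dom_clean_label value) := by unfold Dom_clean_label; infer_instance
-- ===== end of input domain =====

-- B replaces A's balanced-quote peeling loop and three replace passes by one
-- deletion pass over a translation table followed by a single strip; proved equal on all inputs.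


-- ===== PORT A =====
-- length bound used by the port's termination proof
lemma strip_length_le (l : List Char) : (PySem.Chars.strip l).length ≤ l.length := by
  simp only [PySem.Chars.strip, PySem.Chars.rstrip, PySem.Chars.lstrip, List.length_reverse]
  calc (List.dropWhile PySem.Chars.isspace (List.dropWhile PySem.Chars.isspace l).reverse).length
      ≤ (List.dropWhile PySem.Chars.isspace l).reverse.length := List.length_dropWhile_le _ _
    _ ≤ _ := by rw [List.length_reverse]; exact List.length_dropWhile_le _ _

-- the while loop: strip balanced leading/trailing quotes repeatedly
def cleanLoopA (cs : List Char) : List Char :=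
  if h : 2 ≤ cs.length ∧
         PySem.List.pyGetD cs 0 ' ' = PySem.List.pyGetD cs (-1) ' ' ∧
         (PySem.List.pyGetD cs 0 ' ' = '"' ∨ PySem.List.pyGetD cs 0 ' ' = '\'') then
    cleanLoopA (PySem.Chars.strip (PySem.List.slice cs (some 1) (some (-1))))
  else cs
termination_by cs.length
decreasing_by
  have hs : (PySem.List.slice cs (some 1) (some (-1))).length < cs.length := by
    simp only [PySem.List.slice, PySem.List.clampIdx_neg_one]
    have h1 : PySem.List.clampIdx cs.length 1 = 1 := by
      rw [show (1:Int) = ((1:Nat):Int) by norm_num, PySem.List.clampIdx_natCast]; omega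
    rw [h1]
    simp [List.length_take]
    omega
  have hle := strip_length_le (PySem.List.slice cs (some 1) (some (-1)))
  omega

def clean_label (value : Option String) : Option String :=
  match value with
  | none => none
  | some v =>
    let s0 := PySem.Chars.strip v.toList
    let s1 := cleanLoopA s0
    let s2 := ['"', '\'', '*'].foldl (fun s ch => PySem.Chars.replace s [ch] []) s1
    some (String.ofList (PySem.Chars.strip s2))

-- ===== PORT B =====
-- Source B deletes every '"', '\'' and '*' via a translation table; ported as a filter
def pvKeep (c : Char) : Bool := !(c == '"' || c == '\'' || c == '*')

def clean_label_alt (value : Option String) : Option String :=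
  value.map (fun v => String.ofList (PySem.Chars.strip (v.toList.filter pvKeep)))

-- ===== PRECONDITION & SPEC =====
def Spec_clean_label (value : Option String) (out : Option String) : Prop := out = clean_label_alt value
instance (value : Option String) (out : Option String) : Decidable (Spec_clean_label value out) := by unfold Spec_clean_label; infer_instance

-- ===== CLAIM (what is proved, stated in full; the proofs are below) =====
def Claim_equal_clean_label : Prop := ∀ (value : Option String), Dom_clean_label value → Spec_clean_label value (clean_label value)

-- ===== LEMMAS AND PROOFS =====

-- whitespace is never a quote/asterisk character
lemma keep_of_isspace {c : Char} (h : PySem.Chars.isspace c = true) : pvKeep c = true := by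
  by_cases h1 : c = '"'
  · subst h1; simp [PySem.Chars.isspace] at h
  by_cases h2 : c = '\''
  · subst h2; simp [PySem.Chars.isspace] at h
  by_cases h3 : c = '*'
  · subst h3; simp [PySem.Chars.isspace] at h
  simp [pvKeep, h1, h2, h3]

-- str.replace(ch, '') is a filter
lemma replace_go_step (c x : Char) (n : Nat) (t acc : List Char) :
    PySem.Chars.replace.go [c] [] (n+1) (x::t) acc =
      if c = x then PySem.Chars.replace.go [c] [] n t acc
      else PySem.Chars.replace.go [c] [] n t (x::acc) := by
  rw [PySem.Chars.replace.go]
  simp [List.isPrefixOf]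

-- str.replace(ch, '') is a filter
lemma replace_go_filter (c : Char) :
    ∀ (fuel : Nat) (l acc : List Char), l.length ≤ fuel →
      PySem.Chars.replace.go [c] [] fuel l acc = acc.reverse ++ l.filter (fun x => !(x == c)) := by
  intro fuel
  induction fuel with
  | zero =>
    intro l acc h
    have hl : l = [] := List.eq_nil_of_length_eq_zero (Nat.le_zero.1 h)
    subst hl
    simp [PySem.Chars.replace.go]
  | succ n ih =>
    intro l acc h
    cases l with
    | nil => simp [PySem.Chars.replace.go]
    | cons x t =>
      rw [replace_go_step]
      have ht : t.length ≤ n := Nat.le_of_succ_le_succ (by simpa using h)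
      by_cases hx : c = x
      · rw [if_pos hx, ih t acc ht]
        simp [hx]
      · rw [if_neg hx, ih t (x :: acc) ht]
        simp [Ne.symm hx]

lemma replace_filter (c : Char) (l : List Char) :
    PySem.Chars.replace l [c] [] = l.filter (fun x => !(x == c)) := by
  simp only [PySem.Chars.replace]
  rw [if_neg (by simp)]
  simpa using replace_go_filter c l.length l [] (le_refl _)

lemma fold_replace_eq_filter (l : List Char) :
    ['"', '\'', '*'].foldl (fun s ch => PySem.Chars.replace s [ch] []) l = l.filter pvKeep := by
  simp only [List.foldl_cons, List.foldl_nil, replace_filter, List.filter_filter]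
  apply List.filter_congr
  intro x _
  simp only [pvKeep]
  cases h1 : x == '"' <;> cases h2 : x == '\'' <;> cases h3 : x == '*' <;> simp_all

-- dropping an all-whitespace prefix commutes past filter/strip
lemma dropWhile_append_of_all {p : α → Bool} {ws l : List α} (h : ∀ x ∈ ws, p x = true) :
    List.dropWhile p (ws ++ l) = List.dropWhile p l := by
  rw [List.dropWhile_append]
  rw [List.dropWhile_eq_nil_iff.2 h]
  simp

lemma filter_of_all_space (ws : List Char) (h : ∀ x ∈ ws, PySem.Chars.isspace x = true) :
    ws.filter pvKeep = ws :=
  List.filter_eq_self.2 (fun x hx => keep_of_isspace (h x hx))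

-- lstrip (filter P l) = lstrip (filter P (lstrip l))
lemma lstrip_filter (l : List Char) :
    PySem.Chars.lstrip (l.filter pvKeep) = PySem.Chars.lstrip ((PySem.Chars.lstrip l).filter pvKeep) := by
  conv_lhs => rw [← List.takeWhile_append_dropWhile (p := PySem.Chars.isspace) (l := l)]
  have hws : ∀ x ∈ List.takeWhile PySem.Chars.isspace l, PySem.Chars.isspace x = true :=
    fun x hx => List.mem_takeWhile_imp hx
  rw [List.filter_append, filter_of_all_space _ hws]
  exact dropWhile_append_of_all hws

-- rstrip after an lstrip-filter: strip absorbs strip through the filter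
lemma rstrip_lstrip_filter (l : List Char) :
    PySem.Chars.rstrip (PySem.Chars.lstrip (l.filter pvKeep))
      = PySem.Chars.rstrip (PySem.Chars.lstrip ((PySem.Chars.rstrip l).filter pvKeep)) := by
  -- decompose l = t ++ ws with ws the whitespace suffix
  have hdec : l = PySem.Chars.rstrip l ++ (List.takeWhile PySem.Chars.isspace l.reverse).reverse := by
    simp only [PySem.Chars.rstrip]
    rw [← List.reverse_append, List.takeWhile_append_dropWhile]
    simp
  have hws : ∀ x ∈ (List.takeWhile PySem.Chars.isspace l.reverse).reverse, PySem.Chars.isspace x = true := by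
    intro x hx; exact List.mem_takeWhile_imp (List.mem_reverse.1 hx)
  conv_lhs => rw [hdec]
  rw [List.filter_append, filter_of_all_space _ hws]
  -- goal: rstrip (lstrip (a ++ ws)) = rstrip (lstrip a), a := (rstrip l).filter pvKeep
  set a := (PySem.Chars.rstrip l).filter pvKeep with ha
  set ws := (List.takeWhile PySem.Chars.isspace l.reverse).reverse with hwsdef
  by_cases he : PySem.Chars.lstrip a = []
  · have hall : ∀ x ∈ a, PySem.Chars.isspace x = true := by
      simpa [PySem.Chars.lstrip, List.dropWhile_eq_nil_iff] using he
    have : PySem.Chars.lstrip (a ++ ws) = PySem.Chars.lstrip ws :=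
      dropWhile_append_of_all hall
    rw [this, he]
    have : PySem.Chars.lstrip ws = [] := by
      simp [PySem.Chars.lstrip, List.dropWhile_eq_nil_iff]
      intro x hx; exact hws x hx
    rw [this]
  · have : PySem.Chars.lstrip (a ++ ws) = PySem.Chars.lstrip a ++ ws := by
      simp only [PySem.Chars.lstrip] at *
      rw [List.dropWhile_append, if_neg (by simpa using he)]
    rw [this]
    -- rstrip (x ++ ws) = rstrip x
    simp only [PySem.Chars.rstrip, List.reverse_append]
    rw [dropWhile_append_of_all (by intro x hx; exact hws x (List.mem_reverse.1 hx))]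

-- THE invariant: strip (filter P ·) is unchanged by a strip
lemma strip_filter_strip (l : List Char) :
    PySem.Chars.strip ((PySem.Chars.strip l).filter pvKeep) = PySem.Chars.strip (l.filter pvKeep) := by
  simp only [PySem.Chars.strip]
  rw [lstrip_filter l]
  exact (rstrip_lstrip_filter (PySem.Chars.lstrip l)).symm

-- a balanced-quote peel step preserves strip∘filter
lemma peel_step (q : Char) (mid : List Char) (hq : pvKeep q = false) :
    PySem.Chars.strip ((PySem.Chars.strip mid).filter pvKeep)
      = PySem.Chars.strip ((q :: (mid ++ [q])).filter pvKeep) := by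
  rw [strip_filter_strip]
  simp [List.filter_append, hq]

lemma loop_inv : ∀ (n : Nat) (l : List Char), l.length ≤ n →
    PySem.Chars.strip ((cleanLoopA l).filter pvKeep) = PySem.Chars.strip (l.filter pvKeep) := by
  intro n
  induction n with
  | zero =>
    intro l h
    have : l = [] := by cases l <;> simp_all
    subst this; rw [cleanLoopA]; simp
  | succ n ih =>
    intro l h
    rw [cleanLoopA]
    split_ifs with hg
    · obtain ⟨h2, heq, hqor⟩ := hg
      -- decompose l = q :: mid ++ [q]
      obtain ⟨x, t, rfl⟩ : ∃ x t, l = x :: t := by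
        cases l with
        | nil => simp at h2
        | cons a b => exact ⟨a, b, rfl⟩
      have ht : t ≠ [] := by intro he; subst he; simp at h2
      obtain ⟨mid, b, rfl⟩ : ∃ mid b, t = mid ++ [b] :=
        ⟨t.dropLast, t.getLast ht, (List.dropLast_append_getLast ht).symm⟩
      have hx : PySem.List.pyGetD (x :: (mid ++ [b])) 0 ' ' = x :=
        PySem.List.pyGetD_zero_cons _ _ _
      have hb : PySem.List.pyGetD (x :: (mid ++ [b])) (-1) ' ' = b := by
        rw [PySem.List.pyGetD_neg_one _ _ (by simp)]
        simp
      have hbx : b = x := by rw [hx, hb] at heq; exact heq.symm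
      subst hbx
      have hkeep : pvKeep b = false := by
        rw [hx] at hqor
        rcases hqor with h | h <;> simp [pvKeep, h]
      have hslice : PySem.List.slice (b :: (mid ++ [b])) (some 1) (some (-1)) = mid := by
        simp only [PySem.List.slice, PySem.List.clampIdx_neg_one]
        have h1 : PySem.List.clampIdx (b :: (mid ++ [b])).length 1 = 1 := by
          rw [show (1:Int) = ((1:Nat):Int) by norm_num, PySem.List.clampIdx_natCast]
          simp
        rw [h1]
        rw [show (b :: (mid ++ [b])).length - 1 - 1 = mid.length by simp]
        simp
      rw [hslice]
      have hlen : (PySem.Chars.strip mid).length ≤ n := by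
        have h1 : (PySem.Chars.strip mid).length ≤ mid.length := strip_length_le mid
        have : mid.length + 2 ≤ n + 1 := by simpa using h
        omega
      rw [ih _ hlen]
      exact peel_step b mid hkeep
    · rfl

lemma clean_eq (v : String) :
    PySem.Chars.strip ((cleanLoopA (PySem.Chars.strip v.toList)).filter pvKeep)
      = PySem.Chars.strip (v.toList.filter pvKeep) := by
  rw [loop_inv (PySem.Chars.strip v.toList).length _ (le_refl _)]
  exact strip_filter_strip v.toList

-- ===== VERDICT (by name: the statement is the Claim_ definition above) =====
theorem clean_label_spec : Claim_equal_clean_label := by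
  intro value _
  unfold Spec_clean_label clean_label clean_label_alt
  cases value with
  | none => rfl
  | some v =>
    simp only [Option.map_some]
    rw [fold_replace_eq_filter]
    rw [clean_eq]
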